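-- pv_equiv track=rewrite | github.com/rueckstiess/yanex | yanex/cli/commands/get.py | _find_similar_fields
-- ===== SOURCE A (Python) =====
-- def _find_similar_fields(field: str, valid_fields: list[str]) -> list[str]:
--     """Find fields similar to the given field (for typo suggestions).
--
--     Uses simple substring matching and edit distance heuristics.
--
--     Args:
--         field: The unknown field entered by user.
--         valid_fields: List of valid field names.
--
--     Returns:
--         List of up to 3 similar field names.
--     """
--     suggestions = []
--
--     field_lower = field.lower()
--
--     for valid in valid_fields:
--         valid_lower = valid.lower()
--
--         # Check if field is a substring or vice versa
--         if field_lower in valid_lower or valid_lower in field_lower: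
--             suggestions.append(valid)
--             continue
--
--         # Check for common prefix (at least 3 chars)
--         common_prefix_len = 0
--         for i, (c1, c2) in enumerate(zip(field_lower, valid_lower, strict=False)):
--             if c1 == c2:
--                 common_prefix_len = i + 1
--             else:
--                 break
--
--         if common_prefix_len >= 3:
--             suggestions.append(valid)
--
--     # Return up to 3 unique suggestions
--     return list(dict.fromkeys(suggestions))[:3]
-- ===== SOURCE B (Python) =====
-- def _find_similar_fields(field: str, valid_fields: list[str]) -> list[str]:
--     """Single early-stopping pass: collect up to 3 unique similar fields and stop."""
--     fl = field.lower()
--     out = []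
--     for valid in valid_fields:
--         vl = valid.lower()
--         if (fl in vl or vl in fl or fl[:3] == vl[:3]) and valid not in out:
--             out.append(valid)
--             if len(out) == 3:
--                 break
--     return out
-- ===== Notes on version B (the rewrite author's own statement) =====
-- stated objective: simpler
-- what changed: B replaces A's per-candidate character-counting prefix loop with a direct 3-character slice comparison and replaces A's collect-all-then-dedup-then-truncate pipeline with a single early-stopping scan that keeps at most 3 unique suggestions and breaks as soon as it has them.
import Mathlib
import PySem

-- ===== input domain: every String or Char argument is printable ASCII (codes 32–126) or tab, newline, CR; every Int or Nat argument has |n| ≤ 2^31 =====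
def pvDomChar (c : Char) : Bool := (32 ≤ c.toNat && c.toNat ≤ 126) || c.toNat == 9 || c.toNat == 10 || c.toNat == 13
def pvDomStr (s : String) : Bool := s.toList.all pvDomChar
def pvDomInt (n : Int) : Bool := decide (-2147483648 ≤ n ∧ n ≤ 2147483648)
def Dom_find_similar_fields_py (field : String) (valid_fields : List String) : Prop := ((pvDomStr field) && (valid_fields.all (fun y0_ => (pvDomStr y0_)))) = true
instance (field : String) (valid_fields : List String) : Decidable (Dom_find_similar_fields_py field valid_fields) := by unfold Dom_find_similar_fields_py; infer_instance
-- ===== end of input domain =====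

-- B replaces A's per-candidate character-counting loop by a 3-character slice comparison and
-- replaces the collect-all / dedup / truncate pipeline by a single early-stopping scan that keeps
-- at most 3 unique suggestions (objective: simpler; return value only, no mutation involved).

-- ===== PORT A =====
-- inner loop: for i, (c1, c2) in enumerate(zip(fl, vl)): if c1 == c2: common = i + 1 else break
def pvPrefLoopA : List (Int × (Char × Char)) → Int → Int
  | [], acc => acc
  | (i, (c1, c2)) :: rest, acc => if c1 = c2 then pvPrefLoopA rest (i + 1) else acc

def find_similar_fields_py (field : String) (valid_fields : List String) : List String :=
  let field_lower := PySem.Str.lower field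
  let suggestions := valid_fields.foldl (fun acc valid =>
    let valid_lower := PySem.Str.lower valid
    if PySem.Str.isIn field_lower valid_lower || PySem.Str.isIn valid_lower field_lower then
      acc ++ [valid]
    else
      let common_prefix_len :=
        pvPrefLoopA (PySem.List.enumerate ((field_lower.toList).zip (valid_lower.toList)) 0) 0
      if 3 ≤ common_prefix_len then acc ++ [valid] else acc) []
  PySem.List.slice (PySem.List.dedup suggestions) none (some 3)

-- ===== PORT B =====
-- the similarity test of Source B: substring either way, or equal 3-character prefixes
def pvSimB (fl : String) (valid : String) : Bool :=
  let vl := PySem.Str.lower valid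
  PySem.Str.isIn fl vl || PySem.Str.isIn vl fl ||
    decide (PySem.Str.slice fl none (some 3) = PySem.Str.slice vl none (some 3))

-- the loop of Source B: append unseen similar names, break as soon as 3 are collected
def pvGoB (fl : String) : List String → List String → List String
  | [], out => out
  | valid :: rest, out =>
    if pvSimB fl valid && !(out.contains valid) then
      let out' := out ++ [valid]
      if out'.length = 3 then out' else pvGoB fl rest out'
    else pvGoB fl rest out

def find_similar_fields_py_alt (field : String) (valid_fields : List String) : List String :=
  pvGoB (PySem.Str.lower field) valid_fields []

-- ===== PRECONDITION & SPEC =====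
def Spec_find_similar_fields_py (field : String) (valid_fields : List String) (out : List String) : Prop := out = find_similar_fields_py_alt field valid_fields
instance (field : String) (valid_fields : List String) (out : List String) : Decidable (Spec_find_similar_fields_py field valid_fields out) := by unfold Spec_find_similar_fields_py; infer_instance

-- ===== CLAIM (what is proved, stated in full; the proofs are below) =====
def Claim_equal_find_similar_fields_py : Prop := ∀ (field : String) (valid_fields : List String), Dom_find_similar_fields_py field valid_fields → Spec_find_similar_fields_py field valid_fields (find_similar_fields_py field valid_fields)

-- ===== LEMMAS AND PROOFS =====

-- A-side per-candidate predicate, extracted for the proofs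
def pvPA (fl valid : String) : Bool :=
  let vl := PySem.Str.lower valid
  PySem.Str.isIn fl vl || PySem.Str.isIn vl fl ||
    decide (3 ≤ pvPrefLoopA (PySem.List.enumerate ((fl.toList).zip (vl.toList)) 0) 0)

-- length of the common prefix of two character lists (characterisation of A's inner loop)
def pvCpN : List Char → List Char → Nat
  | a :: l, b :: m => if a = b then pvCpN l m + 1 else 0
  | _, _ => 0

lemma pvPrefLoopA_eq (ps : List (Char × Char)) (s acc : Int) :
    pvPrefLoopA (PySem.List.enumerate ps s) acc =
      if pvCpN (ps.map Prod.fst) (ps.map Prod.snd) = 0 then acc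
      else s + pvCpN (ps.map Prod.fst) (ps.map Prod.snd) := by
  induction ps generalizing s acc with
  | nil => simp [PySem.List.enumerate_nil, pvPrefLoopA, pvCpN]
  | cons p rest ih =>
    obtain ⟨c1, c2⟩ := p
    rw [PySem.List.enumerate_cons]
    simp only [pvPrefLoopA, List.map_cons, pvCpN]
    by_cases h : c1 = c2
    · simp [h, ih]
      split_ifs <;> omega
    · simp [h]

lemma pvCpN_zip (l m : List Char) :
    pvCpN ((l.zip m).map Prod.fst) ((l.zip m).map Prod.snd) = pvCpN l m := by
  induction l generalizing m with
  | nil => simp [pvCpN]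
  | cons a l ih =>
    cases m with
    | nil => simp [pvCpN]
    | cons b m => simp [pvCpN, ih]

lemma pvCpN_ge_iff (l m : List Char) (k : Nat) :
    k ≤ pvCpN l m ↔ k ≤ l.length ∧ k ≤ m.length ∧ l.take k = m.take k := by
  induction l generalizing m k with
  | nil => cases k <;> simp [pvCpN]
  | cons a l ih =>
    cases m with
    | nil => cases k <;> simp [pvCpN]
    | cons b m =>
      cases k with
      | zero => simp
      | succ k =>
        by_cases h : a = b
        · simp [pvCpN, h, ih]
        · simp [pvCpN, h]

lemma pvSlice3_toList (s : String) :
    (PySem.Str.slice s none (some 3)).toList = s.toList.take 3 := by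
  rw [PySem.Str.toList_slice, PySem.Chars.slice_eq_listSlice]
  simp [pysem]

-- the two per-candidate similarity tests agree on every candidate
lemma pvP_eq (fl valid : String) : pvPA fl valid = pvSimB fl valid := by
  simp only [pvPA, pvSimB]
  set vl := PySem.Str.lower valid with hvl
  cases hsub : (PySem.Str.isIn fl vl || PySem.Str.isIn vl fl) with
  | true => simp [hsub]
  | false =>
    rw [Bool.or_eq_false_iff] at hsub
    simp only [hsub.1, hsub.2, Bool.false_or]
    rw [decide_eq_decide, pvPrefLoopA_eq, pvCpN_zip]
    have hnpf1 : ¬ fl.toList <:+: vl.toList := fun h => by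
      have h' := (PySem.Str.isIn_iff_infix _ _).mpr h
      rw [hsub.1] at h'; exact Bool.false_ne_true h'
    have hnpf2 : ¬ vl.toList <:+: fl.toList := fun h => by
      have h' := (PySem.Str.isIn_iff_infix _ _).mpr h
      rw [hsub.2] at h'; exact Bool.false_ne_true h'
    constructor
    · intro hge
      have hge' : 3 ≤ pvCpN fl.toList vl.toList := by
        by_cases h0 : pvCpN fl.toList vl.toList = 0 <;> simp [h0] at hge <;> omega
      obtain ⟨_, _, htk⟩ := (pvCpN_ge_iff fl.toList vl.toList 3).mp hge'
      exact String.toList_inj.mp (by rw [pvSlice3_toList, pvSlice3_toList, htk])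
    · intro heq
      have htk : fl.toList.take 3 = vl.toList.take 3 := by
        rw [← pvSlice3_toList, ← pvSlice3_toList, heq]
      have h1 : 3 ≤ fl.toList.length := by
        by_contra hlen
        apply hnpf1
        have he : fl.toList.take 3 = fl.toList := List.take_of_length_le (by omega)
        exact List.IsPrefix.isInfix (he ▸ htk ▸ List.take_prefix 3 vl.toList)
      have h2 : 3 ≤ vl.toList.length := by
        by_contra hlen
        apply hnpf2
        have he : vl.toList.take 3 = vl.toList := List.take_of_length_le (by omega)
        exact List.IsPrefix.isInfix (he ▸ htk.symm ▸ List.take_prefix 3 fl.toList)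
      have := (pvCpN_ge_iff fl.toList vl.toList 3).mpr ⟨h1, h2, htk⟩
      split_ifs with h0 <;> omega

-- A as filter / dedup / take
lemma pvBody_eq (fl v : String) (acc : List String) :
    (if (PySem.Str.isIn fl (PySem.Str.lower v) || PySem.Str.isIn (PySem.Str.lower v) fl) = true then
       acc ++ [v]
     else
       if 3 ≤ pvPrefLoopA (PySem.List.enumerate (fl.toList.zip (PySem.Str.lower v).toList) 0) 0 then
         acc ++ [v]
       else acc) =
    if pvSimB fl v then acc ++ [v] else acc := by
  rw [← pvP_eq]
  simp only [pvPA]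
  by_cases hsub : (PySem.Str.isIn fl (PySem.Str.lower v) || PySem.Str.isIn (PySem.Str.lower v) fl) = true
  · simp only [PySem.Str.isIn_eq, PySem.Str.toList_lower, Bool.or_eq_true] at hsub ⊢
    simp [hsub]
  · rw [Bool.not_eq_true, Bool.or_eq_false_iff] at hsub
    simp only [PySem.Str.isIn_eq, PySem.Str.toList_lower] at hsub ⊢
    simp only [hsub.1, hsub.2, Bool.false_or]
    split_ifs <;> simp_all <;> omega

lemma pvA_closed (field : String) (valid_fields : List String) :
    find_similar_fields_py field valid_fields =
      (PySem.List.dedup (valid_fields.filter (pvSimB (PySem.Str.lower field)))).take 3 := by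
  simp only [find_similar_fields_py, pvBody_eq]
  rw [PySem.List.foldl_append_if_eq_filter, List.nil_append]
  simp [pysem]

-- Set.update only ever appends to the seen list
lemma pvUpdate_append {s l : List String} : ∃ t, PySem.Set.update s l = s ++ t := by
  induction l generalizing s with
  | nil => exact ⟨[], by simp [PySem.Set.update]⟩
  | cons x l ih =>
    have hc : PySem.Set.update s (x :: l) = PySem.Set.update (PySem.Set.add s x) l := by
      simp [PySem.Set.update]
    obtain ⟨t, ht⟩ := ih (s := PySem.Set.add s x)
    by_cases hx : x ∈ s
    · exact ⟨t, by rw [hc, ht]; simp [PySem.Set.add, PySem.Set.contains, hx]⟩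
    · exact ⟨x :: t, by rw [hc, ht]; simp [PySem.Set.add, PySem.Set.contains, hx]⟩

-- B's early-stopping loop versus "dedup then take 3" on the filtered remainder
lemma pvGoB_eq (fl : String) (xs out : List String) (hlen : out.length < 3) :
    pvGoB fl xs out = (PySem.Set.update out (xs.filter (pvSimB fl))).take 3 := by
  induction xs generalizing out with
  | nil =>
    simp [pvGoB, PySem.Set.update, List.take_of_length_le (by omega : out.length ≤ 3)]
  | cons v rest ih =>
    simp only [pvGoB]
    cases hp : pvSimB fl v with
    | false => simp [hp, ih out hlen]
    | true =>
      cases hmem : out.contains v with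
      | true =>
        have hadd : PySem.Set.add out v = out := by
          simp [PySem.Set.add, PySem.Set.contains, List.mem_of_elem_eq_true hmem]
        simp [hp, ih out hlen, PySem.Set.update, hadd]
      | false =>
        have hadd : PySem.Set.add out v = out ++ [v] := by
          have : v ∉ out := fun h => by simp_all
          simp [PySem.Set.add, PySem.Set.contains, this]
        rw [List.filter_cons_of_pos hp]
        have hup : PySem.Set.update out (v :: rest.filter (pvSimB fl)) =
            PySem.Set.update (out ++ [v]) (rest.filter (pvSimB fl)) := by
          simp [PySem.Set.update, hadd]
        rw [hup]
        by_cases h3 : (out ++ [v]).length = 3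
        · obtain ⟨t, ht⟩ := pvUpdate_append (s := out ++ [v]) (l := rest.filter (pvSimB fl))
          rw [ht, ← h3, List.take_left]
          simp [hp, hmem]
        · have hlt : (out ++ [v]).length < 3 := by
            rw [List.length_append] at h3 ⊢; simp at h3 ⊢; omega
          rw [← ih (out ++ [v]) hlt]
          simp [hp, hmem]
          intro h2
          exact absurd (by simp [h2]) h3

-- ===== VERDICT (by name: the statement is the Claim_ definition above) =====
theorem find_similar_fields_py_spec : Claim_equal_find_similar_fields_py := by
  intro field valid_fields _
  unfold Spec_find_similar_fields_py find_similar_fields_py_alt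
  rw [pvA_closed, pvGoB_eq _ _ _ (by simp)]
  rw [PySem.List.dedup_eq_ofList, PySem.Set.ofList_eq_foldl]
  simp [PySem.Set.update]
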